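-- pv_equiv track=rewrite | github.com/BaderOulaid/Interview_Prep | emails.py | solution
-- ===== SOURCE A (Python) =====
-- def solution(L):
--     # write your code in Python 3.6
--     results = {}
--     for address in L:
--         simplified_address = simplify_string(address)
--
--         simplified_string = simplified_address[0] + simplified_address[1]
--
--         if simplified_string in results:
--             results[simplified_string].append(address)
--         else:
--             results[simplified_string] = [address]
--
--     count = 0
--     for key, value in results.items():
--         if len(value) > 1:
--             count += 1
--     return count
--
-- def simplify_string(address):
--     address_list = address.split('@')
--     local_name = address_list[0]
--     domain = address_list[-1]
--     # first simplify local name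
--     # remove dots
--     local_name = local_name.replace(".", "")
--     # split after + in local
--     plus_index = local_name.find('+')
--     if plus_index >= 0:
--         local_name = local_name[:plus_index]
--
--     return [local_name, domain]
-- ===== SOURCE B (Python) =====
-- def solution(L):
--     # sort-and-scan: build the simplified key per address, sort the keys,
--     # then count maximal runs of equal adjacent keys whose length exceeds 1
--     keys = []
--     for address in L:
--         s = simplify_string(address)
--         keys.append(s[0] + s[1])
--     keys.sort()
--     count = 0
--     prev = None
--     run = 0
--     for k in keys:
--         if k == prev:
--             run += 1
--         else:
--             if run > 1:
--                 count += 1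
--             prev = k
--             run = 1
--     if run > 1:
--         count += 1
--     return count
--
-- def simplify_string(address):
--     address_list = address.split('@')
--     local_name = address_list[0]
--     domain = address_list[-1]
--     local_name = local_name.replace(".", "")
--     plus_index = local_name.find('+')
--     if plus_index >= 0:
--         local_name = local_name[:plus_index]
--     return [local_name, domain]
-- ===== Notes on version B (the rewrite author's own statement) =====
-- stated objective: alternative
-- what changed: Replaces hash-based grouping into a dict of address lists with a sort-and-scan: build the list of simplified keys, sort it, and count runs of equal adjacent keys of length > 1.
import Mathlib
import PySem

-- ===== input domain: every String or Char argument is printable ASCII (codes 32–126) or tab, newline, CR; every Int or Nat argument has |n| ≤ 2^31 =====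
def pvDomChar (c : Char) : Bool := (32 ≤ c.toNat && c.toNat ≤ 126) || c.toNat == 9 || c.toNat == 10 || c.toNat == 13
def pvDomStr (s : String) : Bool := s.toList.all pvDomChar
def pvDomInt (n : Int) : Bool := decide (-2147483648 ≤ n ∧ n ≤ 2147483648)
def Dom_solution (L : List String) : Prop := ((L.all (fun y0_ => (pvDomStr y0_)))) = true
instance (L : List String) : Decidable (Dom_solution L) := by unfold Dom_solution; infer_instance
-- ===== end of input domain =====

-- B replaces A's dict grouping with sort-and-scan over the simplified keys (alternative algorithm, similar cost).


-- ===== PORT A =====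
-- shared helper of both Pythons, verbatim
def simplify_string (address : String) : List String :=
  let address_list := (PySem.Str.split? address "@").getD []
  let local_name := (PySem.List.pyGet? address_list 0).getD ""
  let domain := (PySem.List.pyGet? address_list (-1)).getD ""
  let local_name := PySem.Str.replace local_name "." ""
  let plus_index := PySem.Str.find local_name "+"
  let local_name := if plus_index ≥ 0 then PySem.Str.slice local_name none (some plus_index) else local_name
  [local_name, domain]

def solution (L : List String) : Int :=
  let results : PySem.Dict String (List String) :=
    L.foldl (fun d address =>
      let simplified_address := simplify_string address
      let simplified_string :=
        ((PySem.List.pyGet? simplified_address 0).getD "") ++ ((PySem.List.pyGet? simplified_address 1).getD "")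
      if d.contains simplified_string then d.modify simplified_string [] (fun v => v ++ [address])
      else d.insert simplified_string [address]) PySem.Dict.empty
  results.items.foldl (fun count kv => if kv.2.length > 1 then count + 1 else count) 0

-- ===== PORT B =====
def solution_alt (L : List String) : Int :=
  let keys := L.map (fun address =>
    let s := simplify_string address
    ((PySem.List.pyGet? s 0).getD "") ++ ((PySem.List.pyGet? s 1).getD ""))
  let skeys := PySem.List.sorted keys (fun k => k) false
  let st := skeys.foldl (fun (st : Int × Option String × Int) k =>
      if some k == st.2.1 then (st.1, st.2.1, st.2.2 + 1)
      else ((if st.2.2 > 1 then st.1 + 1 else st.1), some k, (1 : Int))) (0, none, 0)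
  if st.2.2 > 1 then st.1 + 1 else st.1

-- ===== PRECONDITION & SPEC =====
def Spec_solution (L : List String) (out : Int) : Prop := out = solution_alt L
instance (L : List String) (out : Int) : Decidable (Spec_solution L out) := by unfold Spec_solution; infer_instance

-- ===== CLAIM (what is proved, stated in full; the proofs are below) =====
def Claim_equal_solution : Prop := ∀ (L : List String), Dom_solution L → Spec_solution L (solution L)

-- ===== LEMMAS AND PROOFS =====

-- number of distinct keys that occur more than once
def pvCan (ks : List String) : Int :=
  ((PySem.List.dedup ks).countP (fun k => 1 < ks.count k) : Int)

-- the scan step and finaliser of port B, named so the proofs can speak about them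
def pvStep (st : Int × Option String × Int) (k : String) : Int × Option String × Int :=
  if some k == st.2.1 then (st.1, st.2.1, st.2.2 + 1)
  else ((if st.2.2 > 1 then st.1 + 1 else st.1), some k, (1 : Int))

def pvFin (st : Int × Option String × Int) : Int :=
  if st.2.2 > 1 then st.1 + 1 else st.1

theorem pvCan_nil : pvCan [] = 0 := rfl

-- head-filter recursion for pvCan
theorem pvCan_cons (k : String) (t : List String) :
    pvCan (k :: t) = (if 1 < t.count k + 1 then (1 : Int) else 0) + pvCan (t.filter (fun x => x ≠ k)) := by
  unfold pvCan
  have hmemf : ∀ x, x ∈ PySem.List.dedup (t.filter (fun y => y ≠ k)) → x ≠ k := by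
    intro x hx
    have := (PySem.List.mem_dedup _ _).1 hx
    have := (List.mem_filter.1 this).2
    simpa using this
  have hcnt : ∀ x, x ≠ k → (t.filter (fun y => y ≠ k)).count x = (k :: t).count x := by
    intro x hx
    rw [List.count_filter (by simpa using hx)]
    simp [Ne.symm hx]
  have hperm : (PySem.List.dedup (k :: t)).Perm (k :: PySem.List.dedup (t.filter (fun y => y ≠ k))) := by
    rw [List.perm_ext_iff_of_nodup (PySem.List.nodup_dedup _)]
    · intro a
      simp only [PySem.List.mem_dedup, List.mem_cons, List.mem_filter]
      constructor
      · rintro (rfl | ha)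
        · exact Or.inl rfl
        · by_cases hak : a = k
          · exact Or.inl hak
          · exact Or.inr ⟨ha, by simpa using hak⟩
      · rintro (rfl | ⟨ha, _⟩)
        · exact Or.inl rfl
        · exact Or.inr ha
    · exact List.nodup_cons.2 ⟨fun h => (hmemf k h) rfl, PySem.List.nodup_dedup _⟩
  rw [hperm.countP_eq, List.countP_cons]
  have hcongr : (PySem.List.dedup (t.filter (fun y => y ≠ k))).countP (fun x => 1 < (k :: t).count x)
      = (PySem.List.dedup (t.filter (fun y => y ≠ k))).countP (fun x => 1 < (t.filter (fun y => y ≠ k)).count x) := by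
    apply List.countP_congr
    intro a ha
    rw [hcnt a (hmemf a ha)]
  rw [hcongr]
  simp only [List.count_cons_self]
  by_cases h1 : 1 < t.count k + 1
  · simp only [h1, decide_true, if_true]
    push_cast
    ring
  · simp only [h1, decide_false, if_false]
    push_cast
    ring

-- the B-side scan over a sorted (Pairwise ≤) list computes pvCan
theorem pvScan_sorted (s : List String) : s.Pairwise (· ≤ ·) →
    ∀ (c r : Int) (k : String), 1 ≤ r → (∀ x ∈ s, k ≤ x) →
    pvFin (s.foldl pvStep (c, some k, r))
      = c + (if 1 < r + (s.count k : Int) then 1 else 0) + pvCan (s.filter (fun x => x ≠ k)) := by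
  induction s with
  | nil =>
    intro _ c r k hr _
    simp only [List.foldl_nil, List.count_nil, List.filter_nil, pvCan_nil, pvFin]
    push_cast
    split_ifs <;> omega
  | cons k' t ih =>
    intro hs c r k hr hbd
    have hs' : t.Pairwise (· ≤ ·) := hs.of_cons
    have hk't : ∀ x ∈ t, k' ≤ x := fun x hx => (List.pairwise_cons.1 hs).1 x hx
    by_cases hkk : k' = k
    · subst hkk
      rw [List.foldl_cons, show pvStep (c, some k', r) k' = (c, some k', r + 1) from by simp [pvStep]]
      rw [ih hs' c (r + 1) k' (by omega) hk't]
      rw [List.count_cons_self, List.filter_cons]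
      simp only [ne_eq, not_true_eq_false, decide_false, Bool.false_eq_true, if_false]
      by_cases h1 : 1 < r + 1 + (t.count k' : Int)
      · rw [if_pos h1, if_pos (by push_cast at h1 ⊢; omega)]
      · rw [if_neg h1, if_neg (by push_cast at h1 ⊢; omega)]
    · have hkle : k ≤ k' := hbd k' (List.mem_cons_self ..)
      have hknotin : ∀ x ∈ k' :: t, x ≠ k := by
        intro x hx hxe
        subst hxe
        rcases List.mem_cons.1 hx with h | h
        · exact hkk h.symm
        · exact hkk (le_antisymm hkle (hk't _ h)).symm
      have hcnt0 : (k' :: t).count k = 0 := by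
        rw [List.count_eq_zero]
        intro h; exact hknotin k h rfl
      have hfilt : (k' :: t).filter (fun x => x ≠ k) = k' :: t := by
        apply List.filter_eq_self.2
        intro a ha; simpa using hknotin a ha
      rw [List.foldl_cons,
        show pvStep (c, some k, r) k' = ((if r > 1 then c + 1 else c), some k', 1) from by
          simp [pvStep, hkk]]
      rw [ih hs' (if r > 1 then c + 1 else c) 1 k' (le_refl 1) hk't]
      rw [hcnt0, hfilt, pvCan_cons]
      by_cases h1 : r > 1 <;> by_cases h2 : 1 < t.count k' + 1 <;>
        · simp only [h1, h2, if_true, if_false]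
          push_cast
          split_ifs <;> omega

-- A's value equals pvCan of the key list
theorem solutionA_eq (key : String → String) (L : List String) :
    (L.foldl (fun (d : PySem.Dict String (List String)) address =>
        if d.contains (key address) then d.modify (key address) [] (fun v => v ++ [address])
        else d.insert (key address) [address]) PySem.Dict.empty).items.foldl
      (fun count kv => if kv.2.length > 1 then count + 1 else count) 0
    = pvCan (L.map key) := by
  have hstep : ∀ (d : PySem.Dict String (List String)) (a : String),
      (if d.contains (key a) then d.modify (key a) [] (fun v => v ++ [a])
       else d.insert (key a) [a]) = d.modify (key a) [] (fun v => v ++ [a]) := by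
    intro d a
    by_cases h : d.contains (key a)
    · simp [h]
    · simp only [h, Bool.false_eq_true, if_false]
      show d.insert (key a) [a] = d.insert (key a) (d.getD (key a) [] ++ [a])
      rw [PySem.Dict.getD_of_not_contains d [] (by simpa using h)]
      rfl
  simp only [hstep]
  set d := L.foldl (fun (d : PySem.Dict String (List String)) a =>
      d.modify (key a) [] (fun v => v ++ [a])) PySem.Dict.empty with hd
  have hnd : d.keys.Nodup := by
    rw [hd]
    exact PySem.Dict.nodup_keys_foldl_modify_key L key [] _ _ PySem.Dict.nodup_keys_empty
  have hkeys : d.keys = PySem.List.dedup (L.map key) := by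
    rw [hd, PySem.Dict.keys_foldl_modify_key]
    rw [PySem.Set.update_eq_append_filter]
    simp [PySem.Dict.keys_empty]
  have hget : ∀ c, (d.getD c []).length = (L.map key).count c := by
    intro c
    have h := PySem.Dict.getD_foldl_modify_append (l := L.map (fun a => (key a, a)))
      (d := (PySem.Dict.empty : PySem.Dict String (List String))) (c := c)
    rw [List.foldl_map] at h
    simp only [PySem.Dict.getD_empty, List.nil_append] at h
    rw [hd, h, List.length_map, ← List.countP_eq_length_filter, List.countP_map, List.count,
      List.countP_map]
    rfl
  rw [PySem.Dict.items_eq_map_keys d hnd []]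
  rw [PySem.List.foldl_ite_add_one]
  simp only [List.countP_map]
  unfold pvCan
  rw [hkeys]
  have hcp := List.countP_congr (l := PySem.List.dedup (L.map key))
      (p := (fun kv : String × List String => decide (1 < kv.2.length)) ∘ (fun k => (k, d.getD k [])))
      (q := fun k => decide (1 < (L.map key).count k))
      (fun a _ => by simp only [Function.comp_apply]; rw [hget a])
  rw [hcp]
  omega

-- ===== VERDICT (by name: the statement is the Claim_ definition above) =====
theorem solution_spec : Claim_equal_solution := by
  intro L _
  unfold Spec_solution solution solution_alt
  set key : String → String := fun address =>
    ((PySem.List.pyGet? (simplify_string address) 0).getD "") ++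
    ((PySem.List.pyGet? (simplify_string address) 1).getD "") with hkey
  have hA := solutionA_eq key L
  simp only at hA ⊢
  rw [hA]
  set ks := L.map key with hks
  set skeys := PySem.List.sorted ks (fun k => k) false with hsk
  have hperm : skeys.Perm ks := PySem.List.sorted_perm ks (fun k => k) false
  have hpw : skeys.Pairwise (· ≤ ·) := PySem.List.sorted_pairwise ks (fun k => k)
  have hspec : pvCan ks = pvCan skeys := by
    unfold pvCan
    have hdperm : (PySem.List.dedup ks).Perm (PySem.List.dedup skeys) := by
      rw [List.perm_ext_iff_of_nodup (PySem.List.nodup_dedup _) (PySem.List.nodup_dedup _)]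
      intro a
      simp only [PySem.List.mem_dedup]
      exact ⟨fun h => hperm.mem_iff.2 h, fun h => hperm.mem_iff.1 h⟩
    rw [hdperm.countP_eq]
    congr 1
    apply List.countP_congr
    intro a _
    rw [hperm.count_eq]
  rw [hspec]
  show pvCan skeys = pvFin (skeys.foldl pvStep (0, none, 0))
  match hsx : skeys with
  | [] => simp [pvCan_nil, pvFin]
  | k :: t =>
    have hpw' : (k :: t).Pairwise (· ≤ ·) := hpw
    have hbd : ∀ x ∈ t, k ≤ x := fun x hx => (List.pairwise_cons.1 hpw').1 x hx
    rw [List.foldl_cons,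
      show pvStep (0, none, 0) k = ((0 : Int), some k, (1 : Int)) from by simp [pvStep]]
    rw [pvScan_sorted t hpw'.of_cons 0 1 k (le_refl 1) hbd]
    rw [pvCan_cons]
    by_cases h1 : 1 < t.count k + 1 <;>
      · simp only [h1, if_true, if_false]
        split_ifs <;> omega
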